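-- pv_equiv track=rewrite | github.com/LegalizeAdulthood/flx | rstsio/disk.py | _getdcs
-- ===== SOURCE A (Python) =====
-- def _getdcs (s):
--     s = (s - 1) >> 16
--     dcs = 1
--     while s:
--         s >>= 1
--         dcs <<= 1
--     if dcs > 64:
--         raise Baddcs
--     return dcs
-- ===== SOURCE B (Python) =====
-- def _getdcs(s):
--     t = (s - 1) >> 16
--     dcs = 1 << t.bit_length()
--     if dcs > 64:
--         raise Baddcs
--     return dcs
-- ===== Notes on version B (the rewrite author's own statement) =====
-- stated objective: simpler
-- what changed: Replaces the iterative halve-and-double loop by a closed-form bit_length computation: dcs = 1 << ((s-1)>>16).bit_length().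
-- outside the precondition, e.g. on _getdcs(0): A does not finish within the time limit, B returns 2; on _getdcs(4194305): A raises NameError, B raises NameError
import Mathlib
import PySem

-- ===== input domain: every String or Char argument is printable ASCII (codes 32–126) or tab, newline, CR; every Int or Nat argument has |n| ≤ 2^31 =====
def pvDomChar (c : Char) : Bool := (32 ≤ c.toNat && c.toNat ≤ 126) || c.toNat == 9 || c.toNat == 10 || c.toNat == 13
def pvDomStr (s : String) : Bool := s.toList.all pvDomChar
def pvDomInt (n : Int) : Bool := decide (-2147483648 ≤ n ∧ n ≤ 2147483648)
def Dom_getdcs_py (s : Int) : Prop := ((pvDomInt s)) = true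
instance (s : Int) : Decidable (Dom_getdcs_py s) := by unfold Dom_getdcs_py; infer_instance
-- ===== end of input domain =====

-- B replaces A's halve-and-double loop by the closed form 1 <<< bit_length((s-1)>>16): simpler, same values on Pre_.


-- ===== PORT A =====
-- A's while-loop; on Pre_ inputs s' = (s-1)>>16 ≤ 63, so at most 6 iterations run and
-- the 64 fuel is never exhausted (the loop diverges in Python only for s ≤ 0, outside Pre_).
def getdcsLoop : Nat → Nat → Int → Int
  | 0, _, dcs => dcs
  | fuel + 1, s, dcs => if s = 0 then dcs else getdcsLoop fuel (s >>> 1) (dcs <<< 1)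

def getdcs_py (s : Int) : Int :=
  -- s = (s - 1) >> 16 ; on Pre_ (s ≥ 1) the value is nonnegative, so Nat '>>>' is Python's '>>'
  let s' : Nat := (s - 1).toNat >>> 16
  -- while s: s >>= 1; dcs <<= 1
  getdcsLoop 64 s' 1
  -- 'if dcs > 64: raise Baddcs' never fires on Pre_ (s ≤ 4194304 gives dcs ≤ 64)

-- ===== PORT B =====
def getdcs_py_alt (s : Int) : Int :=
  let t : Nat := (s - 1).toNat >>> 16   -- (s - 1) >> 16, nonnegative on Pre_
  (1 : Int) <<< (Nat.size t)            -- 1 << t.bit_length(); Nat.size = Python bit_length on Nat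
  -- 'if dcs > 64: raise Baddcs' never fires on Pre_

-- ===== PRECONDITION & SPEC =====
-- Pre_ excludes s ≤ 0, where A's loop never terminates, and s > 4194304, where A raises Baddcs.
def Pre_getdcs_py (s : Int) : Prop := 1 ≤ s ∧ s ≤ 4194304
instance (s : Int) : Decidable (Pre_getdcs_py s) := by unfold Pre_getdcs_py; infer_instance
def pvWitness_getdcs_py : Int := (65537)

def Spec_getdcs_py (s : Int) (out : Int) : Prop := out = getdcs_py_alt s
instance (s : Int) (out : Int) : Decidable (Spec_getdcs_py s out) := by unfold Spec_getdcs_py; infer_instance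

-- ===== CLAIM (what is proved, stated in full; the proofs are below) =====
def Claim_equal_getdcs_py : Prop := ∀ (s : Int), Dom_getdcs_py s → Pre_getdcs_py s → Spec_getdcs_py s (getdcs_py s)

-- ===== LEMMAS AND PROOFS =====
-- the core identity: for the small t Pre_ allows, A's loop equals B's closed form
theorem loop_eq_size : ∀ t : Nat, t ≤ 63 → getdcsLoop 64 t 1 = (1 : Int) <<< (Nat.size t) := by decide

-- ===== VERDICT (by name: the statement is the Claim_ definition above) =====
theorem getdcs_py_spec : Claim_equal_getdcs_py := by
  intro s _ hpre
  obtain ⟨h1, h2⟩ := hpre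
  show getdcs_py s = getdcs_py_alt s
  unfold getdcs_py getdcs_py_alt
  apply loop_eq_size
  have hle : (s - 1).toNat ≤ 4194303 := by omega
  calc (s - 1).toNat >>> 16 = (s - 1).toNat / 2 ^ 16 := Nat.shiftRight_eq_div_pow _ _
    _ ≤ 63 := by omega
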